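-- pv_equiv track=rewrite | github.com/USAFADFCS/final-project-kwon-and-diego | src/tools/evaluator.py | extract_day_blocks
-- ===== SOURCE A (Python) =====
-- DAYS = ["Monday","Tuesday","Wednesday","Thursday","Friday","Saturday","Sunday"]
--
-- def extract_day_blocks(schedule_text):
--     """
--     Returns dictionary:
--     {
--         "Monday": ["07:00-09:00-Gym", "09:00-17:00-Work", ...],
--         ...
--     }
--     """
--     lines = schedule_text.strip().splitlines()
--     result = {}
--     current_day = None
--
--     for line in lines:
--         line = line.strip()
--
--         if line.replace(":", "") in DAYS:
--             current_day = line.replace(":", "")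
--             result[current_day] = []
--             continue
--
--         if current_day and line and "-" in line:
--             result[current_day].append(line)
--
--     return result
-- ===== SOURCE B (Python) =====
-- DAYS = ["Monday","Tuesday","Wednesday","Thursday","Friday","Saturday","Sunday"]
--
-- def extract_day_blocks(schedule_text):
--     lines = [ln.strip() for ln in schedule_text.strip().splitlines()]
--     heads = [i for i, ln in enumerate(lines) if ln.replace(":", "") in DAYS]
--     result = {}
--     for i, j in zip(heads, heads[1:] + [len(lines)]):
--         day = lines[i].replace(":", "")
--         result[day] = [ln for ln in lines[i + 1 : j] if ln and "-" in ln]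
--     return result
-- ===== Notes on version B (the rewrite author's own statement) =====
-- stated objective: alternative
-- what changed: A's single stateful pass (mutable current_day plus per-line dict mutation) is replaced by a two-pass decomposition: first collect all header line indices, then slice each day's block of lines between consecutive headers and assign it in one dict store per header.
import Mathlib
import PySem

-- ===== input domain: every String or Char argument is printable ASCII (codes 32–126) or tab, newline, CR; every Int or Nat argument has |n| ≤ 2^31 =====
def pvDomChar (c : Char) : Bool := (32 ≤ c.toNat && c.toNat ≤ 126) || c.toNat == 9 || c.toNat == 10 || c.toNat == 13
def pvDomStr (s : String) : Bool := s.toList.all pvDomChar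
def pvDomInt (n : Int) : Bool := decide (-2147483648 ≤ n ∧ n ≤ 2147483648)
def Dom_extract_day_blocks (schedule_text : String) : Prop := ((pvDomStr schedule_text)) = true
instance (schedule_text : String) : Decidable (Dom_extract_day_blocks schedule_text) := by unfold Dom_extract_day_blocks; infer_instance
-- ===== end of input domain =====

-- B replaces A's single stateful pass (mutable current_day + dict mutation) by a two-pass index
-- scheme: collect header line indices, then slice each day's block between consecutive headers
-- (objective: alternative decomposition, same O(n) cost).

-- the module constant DAYS (shared by both ports)
def pvDAYS : List String :=
  ["Monday", "Tuesday", "Wednesday", "Thursday", "Friday", "Saturday", "Sunday"]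

-- ===== PORT A =====
-- the body of A's for-loop, after `line = line.strip()`
def pvStep (st : PySem.Dict String (List String) × Option String) (line : String) :
    PySem.Dict String (List String) × Option String :=
  if pvDAYS.contains (PySem.Str.replace line ":" "") then
    (st.1.insert (PySem.Str.replace line ":" "") [], some (PySem.Str.replace line ":" ""))
  else
    -- `current_day and line and "-" in line`: every stored day is a nonempty DAYS entry,
    -- so `current_day` is truthy exactly when it is not None
    match st.2 with
    | some day =>
        if line != "" && PySem.Str.isIn "-" line then
          (st.1.modify day [] (· ++ [line]), some day)
        else st
    | none => st

def extract_day_blocks (schedule_text : String) : List (String × List String) :=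
  ((PySem.Str.splitlines (PySem.Str.strip schedule_text)).foldl
      (fun st line => pvStep st (PySem.Str.strip line))
      (PySem.Dict.empty, none)).1.items

-- ===== PORT B =====
-- body of B's for-loop: `result[day] = [ln for ln in lines[i+1:j] if ln and "-" in ln]`
def pvBInsert (lines : List String) (d : PySem.Dict String (List String)) (ij : Int × Int) :
    PySem.Dict String (List String) :=
  d.insert (PySem.Str.replace (PySem.List.pyGetD lines ij.1 "") ":" "")
    ((PySem.List.slice lines (some (ij.1 + 1)) (some ij.2)).filter
      (fun ln => ln != "" && PySem.Str.isIn "-" ln))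

def extract_day_blocks_alt (schedule_text : String) : List (String × List String) :=
  let lines := (PySem.Str.splitlines (PySem.Str.strip schedule_text)).map PySem.Str.strip
  let heads := ((PySem.List.enumerate lines).filter
      (fun p => pvDAYS.contains (PySem.Str.replace p.2 ":" ""))).map (·.1)
  ((heads.zip (PySem.List.slice heads (some 1) none ++ [PySem.List.len lines])).foldl
      (pvBInsert lines) PySem.Dict.empty).items

-- ===== PRECONDITION & SPEC =====
def Spec_extract_day_blocks (schedule_text : String) (out : List (String × List String)) : Prop := out = extract_day_blocks_alt schedule_text
instance (schedule_text : String) (out : List (String × List String)) : Decidable (Spec_extract_day_blocks schedule_text out) := by unfold Spec_extract_day_blocks; infer_instance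

-- ===== CLAIM (what is proved, stated in full; the proofs are below) =====
def Claim_equal_extract_day_blocks : Prop := ∀ (schedule_text : String), Dom_extract_day_blocks schedule_text → Spec_extract_day_blocks schedule_text (extract_day_blocks schedule_text)

-- ===== LEMMAS AND PROOFS =====

-- abbreviations for the proofs
def pvHdr (s : String) : Bool := pvDAYS.contains (PySem.Str.replace s ":" "")
def pvKp (s : String) : Bool := s != "" && PySem.Str.isIn "-" s
def pvDC (s : String) : String := PySem.Str.replace s ":" ""
def pvIns (d : PySem.Dict String (List String)) (p : String × List String) :
    PySem.Dict String (List String) := d.insert p.1 p.2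
-- the activity block following a header: lines up to the next header, filtered
def pvBlk (t : List String) : List String := (t.takeWhile (fun x => !pvHdr x)).filter pvKp
-- the (day, block) segments of a stripped line list, in appearance order
def pvSegs : List String → List (String × List String)
  | [] => []
  | l :: t => if pvHdr l then (pvDC l, pvBlk t) :: pvSegs t else pvSegs t
-- header positions
def pvHeads (xs : List String) : List Int :=
  ((PySem.List.enumerate xs).filter (fun p => pvHdr p.2)).map (·.1)

theorem pv_modify_insert {κ ν : Type} [BEq κ] [LawfulBEq κ] (d : PySem.Dict κ ν) (k : κ)
    (v d0 : ν) (f : ν → ν) : (d.insert k v).modify k d0 f = d.insert k (f v) := by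
  simp [PySem.Dict.modify, PySem.Dict.getD_insert_self, PySem.Dict.insert_insert_self]

theorem pvA_some (t : List String) : ∀ (d : PySem.Dict String (List String)) (day : String)
    (acc : List String),
    (t.foldl pvStep (d.insert day acc, some day)).1
      = (pvSegs t).foldl pvIns (d.insert day (acc ++ pvBlk t)) := by
  induction t with
  | nil => intro d day acc; simp [pvSegs, pvBlk]
  | cons l t ih =>
    intro d day acc
    by_cases h : pvHdr l = true
    · have hstep : pvStep (d.insert day acc, some day) l
          = ((d.insert day acc).insert (pvDC l) [], some (pvDC l)) := by
        simp [pvStep, pvHdr] at h ⊢; simp [h, pvDC]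
      simp only [List.foldl_cons, hstep]
      rw [ih (d.insert day acc) (pvDC l) []]
      simp [pvSegs, h, pvBlk, pvIns, List.takeWhile_cons, pvIns]
    · by_cases hk : pvKp l = true
      · have hstep : pvStep (d.insert day acc, some day) l
            = (d.insert day (acc ++ [l]), some day) := by
          simp [pvStep, pvHdr] at h ⊢
          simp [h, pvKp] at hk ⊢
          simp [hk, pv_modify_insert]
        simp only [List.foldl_cons, hstep]
        rw [ih d day (acc ++ [l])]
        have hb : pvBlk (l :: t) = l :: pvBlk t := by
          simp [pvBlk, h]
          exact List.filter_cons_of_pos hk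
        have hs : pvSegs (l :: t) = pvSegs t := by simp [pvSegs, h]
        rw [hs, hb]
        simp
      · have hstep : pvStep (d.insert day acc, some day) l
            = (d.insert day acc, some day) := by
          simp [pvKp] at hk
          simp [pvStep, pvHdr] at h ⊢
          simp [h]
          intro h1 h2
          exact absurd h2 (by simp [hk h1])
        simp only [List.foldl_cons, hstep]
        rw [ih d day acc]
        have hb : pvBlk (l :: t) = pvBlk t := by
          simp [pvBlk, h]
          exact List.filter_cons_of_neg (by simpa using hk)
        have hs : pvSegs (l :: t) = pvSegs t := by simp [pvSegs, h]
        rw [hs, hb]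

theorem pvA_none (t : List String) : ∀ (d : PySem.Dict String (List String)),
    (t.foldl pvStep (d, none)).1 = (pvSegs t).foldl pvIns d := by
  induction t with
  | nil => intro d; simp [pvSegs]
  | cons l t ih =>
    intro d
    by_cases h : pvHdr l = true
    · have hstep : pvStep (d, none) l = (d.insert (pvDC l) [], some (pvDC l)) := by
        simp [pvStep, pvHdr] at h ⊢; simp [h, pvDC]
      simp only [List.foldl_cons, hstep]
      rw [pvA_some t d (pvDC l) []]
      simp [pvSegs, h, pvIns]
    · have hstep : pvStep (d, none) l = (d, none) := by
        simp [pvStep, pvHdr] at h ⊢; simp [h]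
      simp only [List.foldl_cons, hstep]
      rw [ih d]
      simp [pvSegs, h]

theorem pv_enum_shift {α : Type} (xs : List α) : ∀ (s : Int),
    PySem.List.enumerate xs (s + 1) = (PySem.List.enumerate xs s).map (fun p => (p.1 + 1, p.2)) := by
  induction xs with
  | nil => intro s; simp [PySem.List.enumerate]
  | cons x xs ih =>
    intro s
    rw [PySem.List.enumerate_cons, PySem.List.enumerate_cons]
    simp only [List.map_cons]
    rw [ih (s + 1)]

theorem pv_heads_cons (l : String) (t : List String) :
    pvHeads (l :: t) = (if pvHdr l then [(0 : Int)] else []) ++ (pvHeads t).map (· + 1) := by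
  unfold pvHeads
  rw [PySem.List.enumerate_cons, pv_enum_shift t 0, List.filter_cons, List.filter_map, List.map_map]
  by_cases h : pvHdr l = true
  · simp [h, List.map_map, Function.comp_def]
  · simp [h, List.map_map, Function.comp_def]

theorem pv_heads_nonneg (xs : List String) : ∀ i ∈ pvHeads xs, 0 ≤ i := by
  induction xs with
  | nil => simp [pvHeads, PySem.List.enumerate]
  | cons x xs ih =>
    intro i hi
    rw [pv_heads_cons] at hi
    rcases List.mem_append.mp hi with h | h
    · by_cases hx : pvHdr x = true
      · simp [hx] at h; omega
      · simp [hx] at h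
    · obtain ⟨j, hj, rfl⟩ := List.mem_map.mp h
      have := ih j hj; omega

theorem pv_first (t : List String) :
    (pvHeads t ++ [PySem.List.len t]).head? = some ((t.takeWhile (fun x => !pvHdr x)).length : Int) := by
  induction t with
  | nil => simp [pvHeads, PySem.List.enumerate, PySem.List.len]
  | cons l t ih =>
    rw [pv_heads_cons]
    by_cases h : pvHdr l = true
    · simp [h, List.takeWhile_cons]
    · simp only [h, if_neg, List.takeWhile_cons]
      rcases hh : pvHeads t ++ [PySem.List.len t] with _ | ⟨j, r⟩
      · simp at hh
      · rw [hh] at ih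
        simp at ih
        rcases hp : pvHeads t with _ | ⟨j0, r0⟩
        · rw [hp] at hh; simp at hh
          simp [hp, PySem.List.len_eq, h, ih, hh]
        · rw [hp] at hh; simp at hh
          simp [hp, h, ih, hh.1]

theorem pv_getD_cons (l : String) (t : List String) (i : Int) (hi : 0 ≤ i) :
    PySem.List.pyGetD (l :: t) (i + 1) "" = PySem.List.pyGetD t i "" := by
  lift i to ℕ using hi
  simp [PySem.List.pyGetD, PySem.List.pyGet?_cons_succ, PySem.List.pyGet?_natCast]

theorem pv_slice_cons {α : Type} (l : α) (t : List α) (a b : Int) (ha : 0 ≤ a) (hb : 0 ≤ b) :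
    PySem.List.slice (l :: t) (some (a + 1)) (some (b + 1)) = PySem.List.slice t (some a) (some b) := by
  simp only [PySem.List.slice, PySem.List.clampIdx, List.length_cons]
  have h1 : ¬ (a + 1 < 0) := by omega
  have h2 : ¬ (a < 0) := by omega
  have h3 : ¬ (b + 1 < 0) := by omega
  have h4 : ¬ (b < 0) := by omega
  simp only [h1, h2, h3, h4, if_neg, if_false]
  have e1 : min (a + 1).toNat (t.length + 1) = min a.toNat t.length + 1 := by omega
  have e2 : min (b + 1).toNat (t.length + 1) = min b.toNat t.length + 1 := by omega
  rw [e1, e2]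
  simp [List.drop_succ_cons]

theorem pv_slice_zero (t : List String) (b : Int) (hb : 0 ≤ b) :
    PySem.List.slice t (some 0) (some b) = t.take b.toNat := by
  simp only [PySem.List.slice, PySem.List.clampIdx]
  have h4 : ¬ (b < 0) := by omega
  simp only [h4, if_neg, if_false]
  simp

theorem pv_shift_fold (l : String) (t : List String) (P : List (Int × Int))
    (hP : ∀ p ∈ P, 0 ≤ p.1 ∧ 0 ≤ p.2) : ∀ (d : PySem.Dict String (List String)),
    (P.map (Prod.map (fun x => x + 1) (fun x => x + 1))).foldl (pvBInsert (l :: t)) d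
      = P.foldl (pvBInsert t) d := by
  intro d
  rw [List.foldl_map]
  apply PySem.List.foldl_congr_mem
  intro acc p hp
  obtain ⟨h1, h2⟩ := hP p hp
  unfold pvBInsert
  simp only [Prod.map_fst, Prod.map_snd]
  rw [pv_getD_cons _ _ _ h1]
  rw [show p.1 + 1 + 1 = (p.1 + 1) + 1 from rfl, pv_slice_cons l t (p.1 + 1) p.2 (by omega) h2]

theorem pv_zip_nonneg (t : List String) :
    ∀ p ∈ (pvHeads t).zip ((pvHeads t).drop 1 ++ [PySem.List.len t]), 0 ≤ p.1 ∧ 0 ≤ p.2 := by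
  intro p hp
  obtain ⟨hp1, hp2⟩ := List.of_mem_zip hp
  constructor
  · exact pv_heads_nonneg t _ hp1
  · rcases List.mem_append.mp hp2 with h | h
    · exact pv_heads_nonneg t _ (List.mem_of_mem_drop h)
    · simp at h
      simp [h, PySem.List.len_eq]

theorem pvB_main (t : List String) : ∀ (d : PySem.Dict String (List String)),
    ((pvHeads t).zip ((pvHeads t).drop 1 ++ [PySem.List.len t])).foldl (pvBInsert t) d
      = (pvSegs t).foldl pvIns d := by
  induction t with
  | nil => intro d; simp [pvHeads, PySem.List.enumerate, pvSegs]
  | cons l t ih =>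
    intro d
    by_cases h : pvHdr l = true
    · -- header line: first pair is (0, end of the leading block of t)
      rw [pv_heads_cons]
      simp only [h, if_pos, List.singleton_append]
      have hfirst := pv_first t
      rcases hr : pvHeads t ++ [PySem.List.len t] with _ | ⟨K, r⟩
      · simp at hr
      · rw [hr] at hfirst
        simp at hfirst
        have hlen : PySem.List.len (l :: t) = PySem.List.len t + 1 := by
          simp [PySem.List.len_eq]
        have hsecond : ((0 : Int) :: (pvHeads t).map (· + 1)).drop 1 ++ [PySem.List.len (l :: t)]
            = (K :: r).map (· + 1) := by
          rw [hlen, ← hr]; simp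
        rw [hsecond]
        simp only [List.map_cons, List.zip_cons_cons, List.foldl_cons]
        have hzr : (pvHeads t).zip r = (pvHeads t).zip ((pvHeads t).drop 1 ++ [PySem.List.len t]) := by
          rcases hh : pvHeads t with _ | ⟨h0, h'⟩
          · simp
          · rw [hh] at hr
            simp at hr
            rw [← hr.2]
            simp [PySem.List.len_eq]
        have hK : (0 : Int) ≤ K := by rw [hfirst]; positivity
        have hblock : PySem.List.slice (l :: t) (some (0 + 1)) (some (K + 1))
            = t.takeWhile (fun x => !pvHdr x) := by
          rw [pv_slice_cons l t 0 K le_rfl hK, pv_slice_zero t K hK, hfirst]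
          simp [(List.prefix_iff_eq_take.mp (List.takeWhile_prefix _)).symm]
        have hd1 : pvBInsert (l :: t) d (0, K + 1) = pvIns d (pvDC l, pvBlk t) := by
          unfold pvBInsert pvIns pvBlk pvDC
          simp only [PySem.List.pyGetD, PySem.List.pyGet?_zero_cons, Option.getD_some]
          rw [hblock]
          rfl
        have hmap : ((pvHeads t).map (· + 1)).zip (r.map (· + 1))
            = ((pvHeads t).zip r).map (Prod.map (fun x => x + 1) (fun x => x + 1)) := by
          rw [List.zip_map]
        rw [hmap, hzr, pv_shift_fold l t _ (pv_zip_nonneg t), ih, hd1]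
        simp [pvSegs, h]
    · rw [pv_heads_cons, if_neg h, List.nil_append]
      have hlen : PySem.List.len (l :: t) = PySem.List.len t + 1 := by
        simp [PySem.List.len_eq]
      have hsecond : ((pvHeads t).map (· + 1)).drop 1 ++ [PySem.List.len (l :: t)]
          = ((pvHeads t).drop 1 ++ [PySem.List.len t]).map (· + 1) := by
        rw [hlen, ← List.map_drop]; simp
      rw [hsecond, List.zip_map, pv_shift_fold l t _ (pv_zip_nonneg t), ih]
      simp [pvSegs, h]

-- the two ports compute the same association list
theorem pv_ports_eq : ∀ (schedule_text : String),
    extract_day_blocks schedule_text = extract_day_blocks_alt schedule_text := by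
  intro s
  unfold extract_day_blocks extract_day_blocks_alt
  rw [← List.foldl_map (f := PySem.Str.strip) (g := pvStep)]
  rw [pvA_none ((PySem.Str.splitlines (PySem.Str.strip s)).map PySem.Str.strip) PySem.Dict.empty]
  show _ = (List.foldl (pvBInsert ((PySem.Str.splitlines (PySem.Str.strip s)).map PySem.Str.strip))
      PySem.Dict.empty
      ((pvHeads ((PySem.Str.splitlines (PySem.Str.strip s)).map PySem.Str.strip)).zip
        (PySem.List.slice (pvHeads ((PySem.Str.splitlines (PySem.Str.strip s)).map PySem.Str.strip)) (some 1) none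
          ++ [PySem.List.len ((PySem.Str.splitlines (PySem.Str.strip s)).map PySem.Str.strip)]))).items
  rw [PySem.List.slice_from _ (by norm_num : (0:Int) ≤ 1)]
  rw [show ((1:Int)).toNat = 1 from rfl]
  rw [pvB_main]

-- ===== VERDICT (by name: the statement is the Claim_ definition above) =====
theorem extract_day_blocks_spec : Claim_equal_extract_day_blocks := by
  intro schedule_text _
  unfold Spec_extract_day_blocks
  exact pv_ports_eq schedule_text
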